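-- pv_equiv track=rewrite | github.com/conda-incubator/relock-conda | relock.py | _split_package_list
-- ===== SOURCE A (Python) =====
-- def _split_package_list(package_list):
--     packages = []
--     for nline in package_list.split("\n"):
--         for cline in nline.split(","):
--             for sline in cline.split():
--                 _pkg = sline.strip()
--                 if _pkg:
--                     packages.append(_pkg)
--     return packages
-- ===== SOURCE B (Python) =====
-- def _split_package_list(package_list):
--     return package_list.replace(",", " ").split()
-- ===== Notes on version B (the rewrite author's own statement) =====
-- stated objective: simpler
-- what changed: Replaces the three nested split loops with a single pass: commas are turned into spaces and one no-argument str.split() yields exactly the maximal runs of non-separator characters, making the strip and emptiness test unnecessary.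
import Mathlib
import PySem

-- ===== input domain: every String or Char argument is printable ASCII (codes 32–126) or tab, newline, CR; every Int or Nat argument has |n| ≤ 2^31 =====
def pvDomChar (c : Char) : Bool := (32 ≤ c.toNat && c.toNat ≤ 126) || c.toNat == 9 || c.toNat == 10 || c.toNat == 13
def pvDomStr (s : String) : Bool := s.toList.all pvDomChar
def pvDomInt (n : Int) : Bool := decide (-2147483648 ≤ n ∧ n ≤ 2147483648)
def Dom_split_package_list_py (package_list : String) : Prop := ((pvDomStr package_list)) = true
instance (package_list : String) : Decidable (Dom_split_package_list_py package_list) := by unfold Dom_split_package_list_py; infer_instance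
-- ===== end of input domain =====

-- B replaces A's three nested split loops by one comma→space substitution followed by a single
-- whitespace split (objective: simpler); the two agree on every input string.


-- ===== PORT A =====
-- s.split(sep) for a nonempty literal sep (PySem.Chars.splitOn is exactly that split)
def pySplitSep (s sep : String) : List String :=
  (PySem.Chars.splitOn s.toList sep.toList).map String.ofList

def split_package_list_py (package_list : String) : List String :=
  (pySplitSep package_list "\n").foldl (fun packages nline =>
    (pySplitSep nline ",").foldl (fun packages cline =>
      (PySem.Str.split₀ cline).foldl (fun packages sline =>
        let pkg := PySem.Str.strip sline
        if pkg ≠ "" then packages ++ [pkg] else packages) packages) packages) []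

-- ===== PORT B =====
def split_package_list_py_alt (package_list : String) : List String :=
  PySem.Str.split₀ (PySem.Str.replace package_list "," " ")

-- ===== PRECONDITION & SPEC =====
def Spec_split_package_list_py (package_list : String) (out : List String) : Prop := out = split_package_list_py_alt package_list
instance (package_list : String) (out : List String) : Decidable (Spec_split_package_list_py package_list out) := by unfold Spec_split_package_list_py; infer_instance

-- ===== CLAIM (what is proved, stated in full; the proofs are below) =====
def Claim_equal_split_package_list_py : Prop := ∀ (package_list : String), Dom_split_package_list_py package_list → Spec_split_package_list_py package_list (split_package_list_py package_list)

-- ===== LEMMAS AND PROOFS =====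

-- maximal runs of non-`p` characters, in order (the semantics shared by both ports)
def pvWords (p : Char → Bool) : List Char → List (List Char)
  | [] => []
  | c :: t =>
    if p c then pvWords p t
    else (c :: t.takeWhile (fun d => !p d)) :: pvWords p (t.dropWhile (fun d => !p d))
termination_by l => l.length
decreasing_by
  all_goals simp
  exact List.length_dropWhile_le _ t

-- split at every occurrence of the character a, keeping empty pieces (Python's s.split(a))
def pvCut (a : Char) : List Char → List (List Char)
  | [] => [[]]
  | c :: t => if c = a then [] :: pvCut a t else (pvCut a t).modifyHead (c :: ·)

theorem pvWords_nil (p : Char → Bool) : pvWords p [] = [] := by rw [pvWords]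

theorem pvWords_cons (p : Char → Bool) (c : Char) (t : List Char) :
    pvWords p (c :: t) =
      if p c then pvWords p t
      else (c :: t.takeWhile (fun d => !p d)) :: pvWords p (t.dropWhile (fun d => !p d)) := by
  rw [pvWords]

theorem replace_go_single (a b : Char) : ∀ (l : List Char) (fuel : Nat), l.length ≤ fuel →
    ∀ acc, PySem.Chars.replace.go [a] [b] fuel l acc
      = acc.reverse ++ l.map (fun c => if c = a then b else c) := by
  intro l
  induction l with
  | nil => intro fuel _ acc; cases fuel <;> simp [PySem.Chars.replace.go]
  | cons c t ih =>
    intro fuel hf acc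
    cases fuel with
    | zero => simp at hf
    | succ f =>
      by_cases hca : c = a
      · have hpre : ([a].isPrefixOf (c :: t)) = true := by simp [List.isPrefixOf, hca]
        simp [PySem.Chars.replace.go, ih f (by simpa using hf) (b :: acc), hca]
      · have hne : ([a].isPrefixOf (c :: t)) = false := by
          simp [List.isPrefixOf]; exact fun h => hca h.symm
        simp [PySem.Chars.replace.go, hne, ih f (by simpa using hf) (c :: acc), hca]

theorem replace_single (a b : Char) (l : List Char) :
    PySem.Chars.replace l [a] [b] = l.map (fun c => if c = a then b else c) := by
  simp [PySem.Chars.replace, replace_go_single a b l l.length le_rfl []]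

theorem split₀_go_eq : ∀ (l cur : List Char) (accs : List (List Char)),
    PySem.Chars.split₀.go l cur accs
      = accs.reverse ++ (if cur.isEmpty then pvWords PySem.Chars.isspace l
          else (cur.reverse ++ l.takeWhile (fun d => !PySem.Chars.isspace d))
              :: pvWords PySem.Chars.isspace (l.dropWhile (fun d => !PySem.Chars.isspace d))) := by
  intro l
  induction l with
  | nil =>
    intro cur accs
    by_cases hc : cur = [] <;>
      simp [PySem.Chars.split₀.go, hc, pvWords_nil]
  | cons c t ih =>
    intro cur accs
    by_cases hsp : PySem.Chars.isspace c
    · by_cases hc : cur = []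
      · simp [PySem.Chars.split₀.go, hsp, hc, ih [] accs, pvWords_cons]
      · simp [PySem.Chars.split₀.go, hsp, hc, ih [] (cur.reverse :: accs), pvWords_cons]
    · have hsp' : PySem.Chars.isspace c = false := by simpa using hsp
      by_cases hc : cur = []
      · subst hc
        simp [PySem.Chars.split₀.go, hsp', ih [c] accs]
        rw [pvWords_cons, if_neg (by simp [hsp'])]
      · simp [PySem.Chars.split₀.go, hsp', hc, ih (c :: cur) accs]

theorem split₀_eq_pvWords (l : List Char) :
    PySem.Chars.split₀ l = pvWords PySem.Chars.isspace l := by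
  simpa [PySem.Chars.split₀] using split₀_go_eq l [] []

theorem splitOn_go_single (a : Char) : ∀ (l : List Char) (fuel : Nat), l.length < fuel →
    ∀ (cur : List Char) (acc : List (List Char)),
      PySem.Chars.splitOn.go [a] fuel l cur acc
        = acc.reverse ++ (pvCut a l).modifyHead (cur.reverse ++ ·) := by
  intro l
  induction l with
  | nil =>
    intro fuel hf cur acc
    cases fuel with
    | zero => simp at hf
    | succ f => simp [PySem.Chars.splitOn.go, pvCut]
  | cons c t ih =>
    intro fuel hf cur acc
    cases fuel with
    | zero => simp at hf
    | succ f =>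
      by_cases hca : c = a
      · have hpre : ([a].isPrefixOf (c :: t)) = true := by simp [List.isPrefixOf, hca]
        have := ih f (by simpa using hf) [] (cur.reverse :: acc)
        simp [PySem.Chars.splitOn.go, this, pvCut, hca]
        cases pvCut a t <;> simp
      · have hne : ([a].isPrefixOf (c :: t)) = false := by
          simp [List.isPrefixOf]; exact fun h => hca h.symm
        have := ih f (by simpa using hf) (c :: cur) acc
        simp [PySem.Chars.splitOn.go, hne, this, pvCut, hca]
        cases pvCut a t <;> simp

theorem splitOn_single (a : Char) (l : List Char) :
    PySem.Chars.splitOn l [a] = pvCut a l := by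
  rw [PySem.Chars.splitOn, splitOn_go_single a l (l.length + 1) (by omega) [] []]
  cases pvCut a l <;> simp

theorem pvCut_no_sep (a : Char) (l : List Char) (h : ∀ c ∈ l, c ≠ a) : pvCut a l = [l] := by
  induction l with
  | nil => rfl
  | cons c t ih =>
    have := h c (by simp)
    simp [pvCut, this, ih (fun d hd => h d (by simp [hd]))]

theorem pvCut_append_sep (a : Char) (r : List Char) : ∀ u, (∀ c ∈ u, c ≠ a) →
    pvCut a (u ++ a :: r) = u :: pvCut a r := by
  intro u
  induction u with
  | nil => intro _; simp [pvCut]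
  | cons c u' ih =>
    intro h
    have hca := h c (by simp)
    simp [pvCut, hca, ih (fun d hd => h d (by simp [hd]))]

theorem takeWhile_append_sep {q : Char → Bool} {a : Char} (hq : q a = false) (r : List Char) :
    ∀ u, (u ++ a :: r).takeWhile q = u.takeWhile q := by
  intro u
  induction u with
  | nil => simp [hq]
  | cons c u' ih => by_cases hc : q c <;> simp [hc, ih]

theorem dropWhile_append_sep {q : Char → Bool} {a : Char} (hq : q a = false) (r : List Char) :
    ∀ u, (u ++ a :: r).dropWhile q = u.dropWhile q ++ a :: r := by
  intro u
  induction u with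
  | nil => simp [hq]
  | cons c u' ih => by_cases hc : q c <;> simp [hc, ih]

theorem takeWhile_congr_mem (p q : Char → Bool) (t : List Char) (h : ∀ d ∈ t, p d = q d) :
    t.takeWhile p = t.takeWhile q := by
  induction t with
  | nil => rfl
  | cons c t ih =>
    have hc := h c (by simp)
    by_cases hp : p c
    · simp [hp, hc ▸ hp, ih fun d hd => h d (by simp [hd])]
    · have hpf : p c = false := by simpa using hp
      simp [hpf, hc ▸ hpf]

theorem pvWords_congr_mem (p q : Char → Bool) : ∀ l, (∀ c ∈ l, p c = q c) →
    pvWords p l = pvWords q l := by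
  intro l
  induction l using pvWords.induct (p := p) with
  | case1 => intro _; rw [pvWords_nil, pvWords_nil]
  | case2 c t hp ih =>
    intro h
    have hq : q c = true := (h c (by simp)) ▸ hp
    rw [pvWords_cons, pvWords_cons, if_pos hp, if_pos hq]
    exact ih fun d hd => h d (by simp [hd])
  | case3 c t hp ih =>
    intro h
    have hq : q c = false := by rw [← h c (by simp)]; simpa using hp
    rw [pvWords_cons, pvWords_cons, if_neg (by simp [hp]), if_neg (by simp [hq])]
    have htw : t.takeWhile (fun d => !p d) = t.takeWhile (fun d => !q d) :=
      takeWhile_congr_mem _ _ t fun d hd => by rw [h d (by simp [hd])]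
    have hdw : t.dropWhile (fun d => !p d) = t.dropWhile (fun d => !q d) := by
      have : t.takeWhile (fun d => !p d) ++ t.dropWhile (fun d => !p d)
           = t.takeWhile (fun d => !q d) ++ t.dropWhile (fun d => !q d) := by
        rw [List.takeWhile_append_dropWhile, List.takeWhile_append_dropWhile]
      rwa [htw, List.append_cancel_left_eq] at this
    rw [htw, ← hdw]
    congr 1
    exact ih fun d hd => h d (List.mem_cons_of_mem c ((List.dropWhile_sublist _).mem hd))

theorem pvWords_append_sep (P : Char → Bool) (a : Char) (hPa : P a = true) (r : List Char) :
    ∀ u, pvWords P (u ++ a :: r) = pvWords P u ++ pvWords P r := by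
  intro u
  induction u using pvWords.induct (p := P) with
  | case1 => rw [pvWords_nil, List.nil_append, List.nil_append, pvWords_cons, if_pos hPa]
  | case2 c t hp ih =>
    rw [List.cons_append, pvWords_cons, if_pos hp, pvWords_cons, if_pos hp, ih]
  | case3 c t hp ih =>
    have hp' : P c = false := by simpa using hp
    have hqa : (fun d => !P d) a = false := by simp [hPa]
    rw [List.cons_append, pvWords_cons, if_neg (by simp [hp']),
      takeWhile_append_sep hqa r t, dropWhile_append_sep hqa r t, ih,
      pvWords_cons, if_neg (by simp [hp'])]
    simp

theorem pvCut_flatMap (p : Char → Bool) (a : Char) :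
    ∀ l, (pvCut a l).flatMap (pvWords p) = pvWords (fun c => p c || c == a) l := by
  suffices h : ∀ (n : Nat) (l : List Char), l.length ≤ n →
      (pvCut a l).flatMap (pvWords p) = pvWords (fun c => p c || c == a) l from
    fun l => h l.length l le_rfl
  intro n
  induction n with
  | zero =>
    intro l hl
    have : l = [] := List.eq_nil_of_length_eq_zero (Nat.le_zero.1 hl)
    subst this
    simp [pvCut, pvWords_nil]
  | succ n ih =>
    intro l hl
    have hsplit : l.takeWhile (fun d => !(d == a)) ++ l.dropWhile (fun d => !(d == a)) = l :=
      List.takeWhile_append_dropWhile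
    have htw : ∀ c ∈ l.takeWhile (fun d => !(d == a)), c ≠ a := by
      intro c hc
      simpa using List.mem_takeWhile_imp hc
    cases hdw : l.dropWhile (fun d => !(d == a)) with
    | nil =>
      have hleq : l.takeWhile (fun d => !(d == a)) = l := by
        conv_rhs => rw [← hsplit, hdw]
        rw [List.append_nil]
      have hnosep : ∀ c ∈ l, c ≠ a := fun c hc => htw c (by rw [hleq]; exact hc)
      rw [pvCut_no_sep a l hnosep]
      simp only [List.flatMap_cons, List.flatMap_nil, List.append_nil]
      exact (pvWords_congr_mem _ _ l fun c hc => by simp [hnosep c hc]).symm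
    | cons d r =>
      have hda : d = a := by
        have h := List.head_dropWhile_not (fun d => !(d == a)) (l := l) (by simp [hdw])
        simpa [hdw] using h
      rw [hda] at hdw
      have hl' : l = l.takeWhile (fun d' => !(d' == a)) ++ a :: r := by
        conv_lhs => rw [← hsplit, hdw]
      have hrlen : r.length ≤ n := by
        have hlen := congrArg List.length hl'
        simp at hlen
        omega
      rw [hl', pvCut_append_sep a r _ htw]
      simp only [List.flatMap_cons]
      rw [ih r hrlen, pvWords_append_sep _ a (by simp) r]
      congr 1
      exact pvWords_congr_mem _ _ _ fun c hc => by simp [htw c hc]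

theorem pvWords_map_sub (a b : Char) (hb : PySem.Chars.isspace b = true) :
    ∀ l, pvWords PySem.Chars.isspace (l.map (fun c => if c = a then b else c))
      = pvWords (fun c => PySem.Chars.isspace c || c == a) l := by
  have hWsub : ∀ d, PySem.Chars.isspace (if d = a then b else d)
      = (PySem.Chars.isspace d || d == a) := by
    intro d
    by_cases hd : d = a
    · simp [hd, hb]
    · simp [hd]
  intro l
  induction l using pvWords.induct (p := fun c => PySem.Chars.isspace c || c == a) with
  | case1 => rw [List.map_nil, pvWords_nil, pvWords_nil]
  | case2 c t hp ih =>
    rw [List.map_cons, pvWords_cons, if_pos (by rw [hWsub]; exact hp), pvWords_cons, if_pos hp, ih]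
  | case3 c t hp ih =>
    have hp' : (PySem.Chars.isspace c || c == a) = false := by simpa using hp
    obtain ⟨hspc, hbeq⟩ : PySem.Chars.isspace c = false ∧ (c == a) = false := by
      simpa using hp'
    have hca : c ≠ a := by simpa using hbeq
    have hsc : (if c = a then b else c) = c := by simp [hca]
    have hcomp : ((fun d => !PySem.Chars.isspace d) ∘ (fun d => if d = a then b else d))
        = fun d => !(PySem.Chars.isspace d || d == a) := by
      funext d; simp [hWsub d]
    have htwm : (t.map (fun d => if d = a then b else d)).takeWhile (fun d => !PySem.Chars.isspace d)
        = t.takeWhile (fun d => !(PySem.Chars.isspace d || d == a)) := by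
      rw [List.takeWhile_map, hcomp]
      trans (t.takeWhile (fun d => !(PySem.Chars.isspace d || d == a))).map id
      · apply List.map_congr_left
        intro d hd
        have hmem := List.mem_takeWhile_imp hd
        simp at hmem
        simp [hmem.2]
      · simp
    have hdwm : (t.map (fun d => if d = a then b else d)).dropWhile (fun d => !PySem.Chars.isspace d)
        = (t.dropWhile (fun d => !(PySem.Chars.isspace d || d == a))).map
            (fun d => if d = a then b else d) := by
      rw [List.dropWhile_map, hcomp]
    rw [List.map_cons, hsc, pvWords_cons, if_neg (by simp [hspc]),
      pvWords_cons, if_neg (by simp [hp']), htwm, hdwm, ih]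

theorem mem_pvWords (p : Char → Bool) : ∀ l t, t ∈ pvWords p l → t ≠ [] ∧ ∀ c ∈ t, p c = false := by
  intro l
  induction l using pvWords.induct (p := p) with
  | case1 => intro t ht; rw [pvWords_nil] at ht; simp at ht
  | case2 c t hp ih => intro w hw; rw [pvWords_cons, if_pos hp] at hw; exact ih w hw
  | case3 c t hp ih =>
    intro w hw
    rw [pvWords_cons, if_neg (by simpa using hp)] at hw
    rcases List.mem_cons.1 hw with h | h
    · subst h
      refine ⟨by simp, ?_⟩
      intro d hd
      rcases List.mem_cons.1 hd with h | h
      · subst h; simpa using hp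
      · simpa using List.mem_takeWhile_imp h
    · exact ih w h

theorem strip_eq_self (l : List Char) (h : ∀ c ∈ l, PySem.Chars.isspace c = false) :
    PySem.Chars.strip l = l := by
  have hds : ∀ (m : List Char), (∀ c ∈ m, PySem.Chars.isspace c = false) →
      m.dropWhile PySem.Chars.isspace = m := by
    intro m hm
    cases m with
    | nil => rfl
    | cons c t => simp [hm c (by simp)]
  simp [PySem.Chars.strip, PySem.Chars.lstrip, PySem.Chars.rstrip, hds l h,
    hds l.reverse (fun c hc => h c (by simpa using hc))]

-- the string-level inner loop collapses: each split() token is nonempty and whitespace-free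
theorem inner_loop_eq (cline : String) (ps : List String) :
    (PySem.Str.split₀ cline).foldl (fun packages sline =>
        let pkg := PySem.Str.strip sline
        if pkg ≠ "" then packages ++ [pkg] else packages) ps
      = ps ++ PySem.Str.split₀ cline := by
  rw [PySem.List.foldl_congr_mem _ _ (fun packages sline => packages ++ [sline]) ps ?_,
    PySem.List.foldl_append_singleton]
  intro acc sl hsl
  rw [PySem.Str.split₀] at hsl
  obtain ⟨w, hw, rfl⟩ := List.mem_map.1 hsl
  rw [split₀_eq_pvWords] at hw
  obtain ⟨hne, hns⟩ := mem_pvWords _ _ w hw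
  have hstrip : PySem.Str.strip (String.ofList w) = String.ofList w := by
    rw [PySem.Str.strip, String.toList_ofList, strip_eq_self w hns]
  have hnb : String.ofList w ≠ "" := by
    intro h
    exact hne (by simpa using congrArg String.toList h)
  simp [hstrip, hnb]

theorem A_eq (s : String) :
    split_package_list_py s
      = ((pvCut '\n' s.toList).flatMap
          (fun n => (pvCut ',' n).flatMap (pvWords PySem.Chars.isspace))).map String.ofList := by
  have hps : ∀ (x : String) (sep : String) (a : Char), sep.toList = [a] →
      pySplitSep x sep = (pvCut a x.toList).map String.ofList := by
    intro x sep a hsep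
    rw [pySplitSep, hsep, splitOn_single]
  unfold split_package_list_py
  rw [PySem.List.foldl_congr_mem _ _
      (fun packages nline => packages ++ (pySplitSep nline ",").flatMap PySem.Str.split₀) [] ?_]
  · rw [PySem.List.foldl_append_eq_flatMap, List.nil_append,
      hps s "\n" '\n' rfl, List.flatMap_map]
    rw [List.map_flatMap]
    refine List.flatMap_congr ?_
    intro n _
    rw [hps (String.ofList n) "," ',' rfl, List.flatMap_map]
    rw [show (fun a => PySem.Str.split₀ (String.ofList a)) = fun a =>
        (pvWords PySem.Chars.isspace a).map String.ofList from
      funext fun a => by rw [PySem.Str.split₀, String.toList_ofList, split₀_eq_pvWords],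
      String.toList_ofList, ← List.map_flatMap]
  · intro acc nline _
    rw [PySem.List.foldl_congr_mem _ _
        (fun packages cline => packages ++ PySem.Str.split₀ cline) acc
        (fun acc2 cline _ => inner_loop_eq cline acc2),
      PySem.List.foldl_append_eq_flatMap]

theorem B_eq (s : String) :
    split_package_list_py_alt s
      = (pvWords (fun c => PySem.Chars.isspace c || c == ',') s.toList).map String.ofList := by
  rw [split_package_list_py_alt, PySem.Str.split₀, split₀_eq_pvWords, PySem.Str.toList_replace]
  rw [show (("," : String).toList) = [','] from rfl, show ((" " : String).toList) = [' '] from rfl]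
  rw [replace_single, pvWords_map_sub ',' ' ' (by decide)]

-- ===== VERDICT (by name: the statement is the Claim_ definition above) =====
theorem split_package_list_py_spec : Claim_equal_split_package_list_py := by
  intro s _
  unfold Spec_split_package_list_py
  rw [A_eq, B_eq]
  congr 1
  rw [show (fun n => (pvCut ',' n).flatMap (pvWords PySem.Chars.isspace))
        = fun n => pvWords (fun c => PySem.Chars.isspace c || c == ',') n from
      funext fun n => pvCut_flatMap _ ',' n]
  rw [pvCut_flatMap _ '\n' s.toList]
  apply pvWords_congr_mem
  intro c _
  by_cases hc : c = '\n'
  · subst hc; simp [show PySem.Chars.isspace '\n' = true from by decide]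
  · simp [hc]
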